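-- pv_equiv track=rewrite | github.com/VladKochetov007/HWAgent | hwagent/tools/smart_latex_generator_tool.py | _wrap_lists
-- ===== SOURCE A (Python) =====
-- def _wrap_lists(content: str) -> str:
--     """Wrap consecutive \\item entries in proper list environments"""
--
--     lines = content.split('\n')
--     result_lines = []
--     in_list = False
--
--     for line in lines:
--         if line.strip().startswith('\\item'):
--             if not in_list:
--                 result_lines.append('\\begin{itemize}')
--                 in_list = True
--             result_lines.append(line)
--         else:
--             if in_list:
--                 result_lines.append('\\end{itemize}')
--                 in_list = False
--             result_lines.append(line)
--
--     if in_list: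
--         result_lines.append('\\end{itemize}')
--
--     return '\n'.join(result_lines)
-- ===== SOURCE B (Python) =====
-- def _wrap_lists(content: str) -> str:
--     """Wrap consecutive \\item entries in proper list environments"""
--     # Phase 1: group consecutive lines into maximal runs by whether they are \item lines.
--     groups = []
--     for line in content.split('\n'):
--         k = line.strip().startswith('\\item')
--         if groups and groups[-1][0] == k:
--             groups[-1][1].append(line)
--         else:
--             groups.append((k, [line]))
--     # Phase 2: emit each group, wrapping item runs in an itemize environment.
--     out = []
--     for k, g in groups:
--         if k:
--             out.append('\\begin{itemize}')
--             out.extend(g)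
--             out.append('\\end{itemize}')
--         else:
--             out.extend(g)
--     return '\n'.join(out)
-- ===== Notes on version B (the rewrite author's own statement) =====
-- stated objective: simpler
-- what changed: Replaces the running in_list flag and per-line open/close bookkeeping (plus the trailing-close fixup) by a two-phase groupby: first collect maximal runs of \item / non-\item lines, then emit each run, wrapping item runs in begin/end itemize.
import Mathlib
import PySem

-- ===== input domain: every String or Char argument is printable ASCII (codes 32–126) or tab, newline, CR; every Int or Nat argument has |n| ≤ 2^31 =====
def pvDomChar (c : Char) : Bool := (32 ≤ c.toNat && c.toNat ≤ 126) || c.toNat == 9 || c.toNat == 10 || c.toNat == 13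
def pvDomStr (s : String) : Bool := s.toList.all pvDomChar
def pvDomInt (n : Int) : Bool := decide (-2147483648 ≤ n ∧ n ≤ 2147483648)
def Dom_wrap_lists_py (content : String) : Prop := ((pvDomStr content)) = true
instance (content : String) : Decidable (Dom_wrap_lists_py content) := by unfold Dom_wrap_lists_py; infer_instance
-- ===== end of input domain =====

-- B replaces A's running in_list flag by a two-phase groupby (collect maximal runs, then emit
-- each run wrapped); objective: simpler decomposition, same O(n) cost.

-- the per-line test both Pythons perform: line.strip().startswith('\item')
def pvKey (line : String) : Bool :=
  PySem.Str.startswith (PySem.Str.strip line) "\\item"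

-- ===== PORT A =====
-- one iteration of A's for-loop: state = (result_lines, in_list)
def pvAStep (st : List String × Bool) (line : String) : List String × Bool :=
  if pvKey line then
    if !st.2 then (st.1 ++ ["\\begin{itemize}", line], true)
    else (st.1 ++ [line], true)
  else
    if st.2 then (st.1 ++ ["\\end{itemize}", line], false)
    else (st.1 ++ [line], false)

def wrap_lists_py (content : String) : String :=
  -- content.split('\n'): sep is the nonempty literal "\n", so split? is always some
  let lines := (PySem.Str.split? content "\n").getD []
  let st := lines.foldl pvAStep ([], false)
  PySem.Str.join "\n" (if st.2 then st.1 ++ ["\\end{itemize}"] else st.1)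

-- ===== PORT B =====
-- phase 1 of Source B: extend the last group or open a new one
def pvGroupStep (groups : List (Bool × List String)) (line : String) : List (Bool × List String) :=
  let k := pvKey line
  match groups.getLast? with
  | some last =>
      if last.1 == k then groups.dropLast ++ [(last.1, last.2 ++ [line])]
      else groups ++ [(k, [line])]
  | none => [(k, [line])]

-- phase 2 of Source B: the lines one group contributes to out
def pvEmit (g : Bool × List String) : List String :=
  if g.1 then "\\begin{itemize}" :: g.2 ++ ["\\end{itemize}"] else g.2

def wrap_lists_py_alt (content : String) : String :=
  let groups := ((PySem.Str.split? content "\n").getD []).foldl pvGroupStep []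
  PySem.Str.join "\n" (groups.foldl (fun out g => out ++ pvEmit g) [])

-- ===== PRECONDITION & SPEC =====
def Spec_wrap_lists_py (content : String) (out : String) : Prop := out = wrap_lists_py_alt content
instance (content : String) (out : String) : Decidable (Spec_wrap_lists_py content out) := by unfold Spec_wrap_lists_py; infer_instance

-- ===== CLAIM (what is proved, stated in full; the proofs are below) =====
def Claim_equal_wrap_lists_py : Prop := ∀ (content : String), Dom_wrap_lists_py content → Spec_wrap_lists_py content (wrap_lists_py content)

-- ===== LEMMAS AND PROOFS =====

-- the common recursive characterisation of the output lines, given the lines and the in-list flag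
def pvGo : List String → Bool → List String
  | [], b => if b then ["\\end{itemize}"] else []
  | l :: ls, b =>
    if pvKey l then (if b then [l] else ["\\begin{itemize}", l]) ++ pvGo ls true
    else (if b then ["\\end{itemize}", l] else [l]) ++ pvGo ls false

-- A's fold (plus the trailing close) equals pvGo
theorem pvA_go (ls : List String) : ∀ (acc : List String) (b : Bool),
    (if (ls.foldl pvAStep (acc, b)).2 then (ls.foldl pvAStep (acc, b)).1 ++ ["\\end{itemize}"]
     else (ls.foldl pvAStep (acc, b)).1) = acc ++ pvGo ls b := by
  induction ls with
  | nil => intro acc b; cases b <;> simp [pvGo]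
  | cons l ls ih =>
    intro acc b
    by_cases hk : pvKey l <;> cases b <;>
      simp [pvAStep, pvGo, hk, ih, List.foldl_cons]

theorem pvGroupStep_ne_nil (gs : List (Bool × List String)) (l : String) :
    pvGroupStep gs l ≠ [] := by
  unfold pvGroupStep
  split
  · dsimp only; split <;> simp
  · simp

-- the group fold only ever touches the tail: a nonempty suffix absorbs the whole run
theorem pvFold_split (ls : List String) : ∀ (gs rest : List (Bool × List String)), rest ≠ [] →
    List.foldl pvGroupStep (gs ++ rest) ls = gs ++ List.foldl pvGroupStep rest ls := by
  induction ls with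
  | nil => intro gs rest _; rfl
  | cons l ls ih =>
    intro gs rest h
    obtain ⟨rs, r, rfl⟩ := (List.eq_nil_or_concat rest).resolve_left h
    have hstep : pvGroupStep (gs ++ rs.concat r) l = gs ++ pvGroupStep (rs.concat r) l := by
      simp only [pvGroupStep, List.concat_eq_append, ← List.append_assoc,
        List.getLast?_concat, List.dropLast_concat]
      split <;> simp
    simp only [List.foldl_cons, hstep]
    exact ih _ _ (pvGroupStep_ne_nil (rs.concat r) l)

-- emitting the groups grown from a single seed group equals pvGo
theorem pvB_go (ls : List String) : ∀ (k : Bool) (g : List String),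
    (List.foldl pvGroupStep [(k, g)] ls).flatMap pvEmit
      = (if k then "\\begin{itemize}" :: g else g) ++ pvGo ls k := by
  induction ls with
  | nil => intro k g; cases k <;> simp [pvEmit, pvGo]
  | cons l ls ih =>
    intro k g
    simp only [List.foldl_cons]
    by_cases hk : pvKey l
    · cases k
      · -- new True group opens after a False group
        have : pvGroupStep [(false, g)] l = [(false, g)] ++ [(true, [l])] := by
          simp [pvGroupStep, hk]
        rw [this, pvFold_split ls [(false, g)] [(true, [l])] (by simp)]
        simp [pvEmit, pvGo, hk, ih]
      · -- same key: line joins the open True group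
        have : pvGroupStep [(true, g)] l = [(true, g ++ [l])] := by
          simp [pvGroupStep, hk]
        rw [this, ih]
        simp [pvGo, hk]
    · cases k
      · have : pvGroupStep [(false, g)] l = [(false, g ++ [l])] := by
          simp [pvGroupStep, hk]
        rw [this, ih]
        simp [pvGo, hk]
      · have : pvGroupStep [(true, g)] l = [(true, g)] ++ [(false, [l])] := by
          simp [pvGroupStep, hk]
        rw [this, pvFold_split ls [(true, g)] [(false, [l])] (by simp)]
        simp [pvEmit, pvGo, hk, ih]

theorem pvEmitFold (gs : List (Bool × List String)) : ∀ (init : List String),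
    List.foldl (fun out g => out ++ pvEmit g) init gs = init ++ gs.flatMap pvEmit := by
  induction gs with
  | nil => simp
  | cons g t ih => intro init; simp [List.foldl_cons, ih]

theorem pvB_lines (ls : List String) :
    (List.foldl pvGroupStep [] ls).foldl (fun out g => out ++ pvEmit g) [] = pvGo ls false := by
  rw [pvEmitFold, List.nil_append]
  cases ls with
  | nil => rfl
  | cons l ls =>
    simp only [List.foldl_cons]
    have h0 : pvGroupStep [] l = [(pvKey l, [l])] := by simp [pvGroupStep]
    rw [h0, pvB_go]
    by_cases hk : pvKey l <;> simp [pvGo, hk]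

-- ===== VERDICT (by name: the statement is the Claim_ definition above) =====
theorem wrap_lists_py_spec : Claim_equal_wrap_lists_py := by
  intro content _
  unfold Spec_wrap_lists_py
  simp only [wrap_lists_py, wrap_lists_py_alt]
  rw [pvB_lines]
  have h := pvA_go ((PySem.Str.split? content "\n").getD []) [] false
  simp only [List.nil_append] at h
  rw [h]
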